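-- pv_equiv track=rewrite | github.com/nomad-hzb/nomad-hysprint | src/nomad_hysprint/schema_packages/file_parser/mps_file_parser.py | headeranddelimiter
-- ===== SOURCE A (Python) =====
-- def headeranddelimiter(lines):
--     header = 0
--     header_found = False
--     decimal = '.'
--     for i, line in enumerate(lines):
--         line_decode = line
--         if line_decode.startswith('mode') or line_decode.startswith('freq/Hz'):
--             header = i
--             header_found = True
--         if header_found:
--             if ',' in line_decode and '.' not in line_decode:
--                 decimal = ','
--             if '.' in line_decode and decimal == ',':
--                 raise Exception('decimal delimiter . and , found')
--
--     return header, decimal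
-- ===== SOURCE B (Python) =====
-- def headeranddelimiter(lines):
--     # phase 1: collect all header line indices
--     idxs = [i for i, line in enumerate(lines)
--             if line.startswith('mode') or line.startswith('freq/Hz')]
--     if not idxs:
--         return 0, '.'
--     header = idxs[-1]
--     first = idxs[0]
--     # phase 2: determine the decimal delimiter from the first header line on
--     decimal = '.'
--     for line in lines[first:]:
--         if ',' in line and '.' not in line:
--             decimal = ','
--         if '.' in line and decimal == ',':
--             raise Exception('decimal delimiter . and , found')
--     return header, decimal
-- ===== Notes on version B (the rewrite author's own statement) =====
-- stated objective: alternative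
-- what changed: Replaces A's single stateful scan (header index + found flag + delimiter carried together) by two separate phases: one pass collecting all header indices (header = last, start = first), then a delimiter scan over the slice lines[first:] only.
import Mathlib
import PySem

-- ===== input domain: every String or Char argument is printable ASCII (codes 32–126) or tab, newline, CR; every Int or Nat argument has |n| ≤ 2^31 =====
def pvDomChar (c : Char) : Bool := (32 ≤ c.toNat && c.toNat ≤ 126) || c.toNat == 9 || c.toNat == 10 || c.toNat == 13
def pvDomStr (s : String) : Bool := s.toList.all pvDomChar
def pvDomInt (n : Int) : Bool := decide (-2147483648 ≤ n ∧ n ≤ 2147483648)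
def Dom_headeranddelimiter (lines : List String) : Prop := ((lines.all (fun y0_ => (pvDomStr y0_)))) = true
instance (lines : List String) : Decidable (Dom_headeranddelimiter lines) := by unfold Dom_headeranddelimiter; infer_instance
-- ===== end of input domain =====

-- B computes the same result in two separate phases (collect header indices, then scan the
-- suffix for the delimiter) instead of A's single stateful scan; same cost, different structure.

-- shared tiny predicates (the Python string tests both programs use)
def pvIsHeader (line : String) : Bool :=
  PySem.Str.startswith line "mode" || PySem.Str.startswith line "freq/Hz"
def pvHasC (line : String) : Bool := PySem.Str.isIn "," line
def pvHasD (line : String) : Bool := PySem.Str.isIn "." line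

-- ===== PORT A =====
-- A's loop body; the explicit `raise` is modelled as `none` (those inputs are excluded by Pre_).
def pvAStep (st : Option (Int × Bool × String)) (p : Int × String) :
    Option (Int × Bool × String) :=
  match st with
  | none => none
  | some (header, found, decimal) =>
    let hf := if pvIsHeader p.2 then (p.1, true) else (header, found)
    if hf.2 then
      let decimal' := if pvHasC p.2 && !pvHasD p.2 then "," else decimal
      if pvHasD p.2 && decimal' == "," then none
      else some (hf.1, hf.2, decimal')
    else some (hf.1, hf.2, decimal)

def headeranddelimiter (lines : List String) : Int × String :=
  match (PySem.List.enumerate lines 0).foldl pvAStep (some (0, false, ".")) with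
  | some (h, _, d) => (h, d)
  | none => (0, ".")   -- unreachable under Pre_ (Python raises here)

-- ===== PORT B =====
-- the list comprehension of Source B
def pvIdxs (lines : List String) : List Int :=
  (PySem.List.enumerate lines 0).filterMap (fun p => if pvIsHeader p.2 then some p.1 else none)

-- Source B's phase-2 loop body; the explicit `raise` is modelled as `none`
def pvDStep (st : Option String) (line : String) : Option String :=
  match st with
  | none => none
  | some d =>
    let d' := if pvHasC line && !pvHasD line then "," else d
    if pvHasD line && d' == "," then none else some d'

def headeranddelimiter_alt (lines : List String) : Int × String :=
  match h : pvIdxs lines with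
  | [] => (0, ".")
  | f :: rest =>
    let header := (f :: rest).getLast (by simp)      -- idxs[-1]
    match (PySem.List.slice lines (some f) none).foldl pvDStep (some ".") with
    | some d => (header, d)
    | none => (0, ".")   -- unreachable under Pre_ (Python raises here)

-- ===== PRECONDITION & SPEC =====
-- Pre_ excludes exactly the inputs on which A raises Exception('decimal delimiter . and , found'):
-- from the first header line on, some line with ',' but no '.' is followed (at ≥ its index) by a line containing '.'.
def Pre_headeranddelimiter (lines : List String) : Prop :=
  ∀ f ∈ (lines.findIdx? (fun l => pvIsHeader l)).toList,
    ∀ k ∈ List.range lines.length, ∀ j ∈ List.range lines.length, f ≤ k → k ≤ j →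
      ¬ (pvHasC (lines.getD k "") = true ∧ pvHasD (lines.getD k "") = false ∧
         pvHasD (lines.getD j "") = true)
instance (lines : List String) : Decidable (Pre_headeranddelimiter lines) := by
  unfold Pre_headeranddelimiter; infer_instance

def pvWitness_headeranddelimiter : List String := ["x", "mode a", "1,2", "3,4"]

def Spec_headeranddelimiter (lines : List String) (out : Int × String) : Prop :=
  out = headeranddelimiter_alt lines
instance (lines : List String) (out : Int × String) : Decidable (Spec_headeranddelimiter lines out) := by
  unfold Spec_headeranddelimiter; infer_instance

-- ===== CLAIM (what is proved, stated in full; the proofs are below) =====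
def Claim_equal_headeranddelimiter : Prop := ∀ (lines : List String),
  Dom_headeranddelimiter lines → Pre_headeranddelimiter lines →
  Spec_headeranddelimiter lines (headeranddelimiter lines)

-- ===== LEMMAS AND PROOFS =====

-- A's fold absorbs none
theorem pvAStep_none (l : List (Int × String)) : l.foldl pvAStep none = none := by
  induction l with
  | nil => rfl
  | cons p t ih => simpa [pvAStep] using ih

-- B's fold absorbs none
theorem pvDStep_none (l : List String) : l.foldl pvDStep none = none := by
  induction l with
  | nil => rfl
  | cons p t ih => simpa [pvDStep] using ih

-- last header index tracked by A after `found`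
def pvLastHdr : List String → Int → Int → Int
  | [], _, h => h
  | l :: t, n, h => pvLastHdr t (n + 1) (if pvIsHeader l then n else h)

def pvIdxsFrom (s : List String) (n : Int) : List Int :=
  (PySem.List.enumerate s n).filterMap (fun p => if pvIsHeader p.2 then some p.1 else none)

theorem pvIdxsFrom_cons (l : String) (t : List String) (n : Int) :
    pvIdxsFrom (l :: t) n =
      (if pvIsHeader l then [n] else []) ++ pvIdxsFrom t (n + 1) := by
  rw [pvIdxsFrom, PySem.List.enumerate_cons, List.filterMap_cons]
  by_cases hl : pvIsHeader l <;> simp [hl, pvIdxsFrom]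

theorem pvLastHdr_eq_getLastD (s : List String) (n h : Int) :
    pvLastHdr s n h = (pvIdxsFrom s n).getLastD h := by
  induction s generalizing n h with
  | nil => simp [pvLastHdr, pvIdxsFrom, PySem.List.enumerate_nil]
  | cons l t ih =>
    rw [pvIdxsFrom_cons, pvLastHdr]
    by_cases hl : pvIsHeader l
    · rw [if_pos hl, if_pos hl, List.singleton_append, List.getLastD_cons]
      exact ih (n + 1) n
    · rw [if_neg hl, if_neg hl, List.nil_append]
      exact ih (n + 1) h

-- main invariant: after the header is found, A's fold is B's delimiter fold plus last-header tracking
theorem pvMain (s : List String) (n h : Int) (d : String) :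
    (PySem.List.enumerate s n).foldl pvAStep (some (h, true, d)) =
      (s.foldl pvDStep (some d)).map (fun d' => (pvLastHdr s n h, true, d')) := by
  induction s generalizing n h d with
  | nil => simp [PySem.List.enumerate_nil, pvLastHdr]
  | cons l t ih =>
    rw [PySem.List.enumerate_cons]
    simp only [List.foldl_cons]
    by_cases hr : pvHasD l = true ∧ (if pvHasC l && !pvHasD l then "," else d) == ","
    · have hstep : pvAStep (some (h, true, d)) (n, l) = none := by
        simp only [pvAStep]
        split
        · simp_all
        · simp_all
      have hstepD : pvDStep (some d) l = none := by
        simp only [pvDStep]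
        simp_all
      rw [hstep, hstepD, pvAStep_none, pvDStep_none]
      rfl
    · have hstep : pvAStep (some (h, true, d)) (n, l) =
          some ((if pvIsHeader l then n else h), true,
                (if pvHasC l && !pvHasD l then "," else d)) := by
        simp only [pvAStep]
        split <;> simp_all
      have hstepD : pvDStep (some d) l = some (if pvHasC l && !pvHasD l then "," else d) := by
        simp only [pvDStep]
        simp_all
      rw [hstep, hstepD, ih]
      rfl

-- before any header line, A's state is unchanged
theorem pvPrefix (pre : List String) (n : Int) (hpre : ∀ l ∈ pre, pvIsHeader l = false) :
    (PySem.List.enumerate pre n).foldl pvAStep (some (0, false, ".")) =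
      some (0, false, ".") := by
  induction pre generalizing n with
  | nil => simp [PySem.List.enumerate_nil]
  | cons l t ih =>
    rw [PySem.List.enumerate_cons]
    simp only [List.foldl_cons]
    have hl : pvIsHeader l = false := hpre l (by simp)
    have : pvAStep (some (0, false, ".")) (n, l) = some (0, false, ".") := by
      simp [pvAStep, hl]
    rw [this]
    exact ih (n + 1) (fun x hx => hpre x (by simp [hx]))

theorem pvIdxsFrom_nil_of_no_header (pre : List String) (n : Int)
    (hpre : ∀ l ∈ pre, pvIsHeader l = false) : pvIdxsFrom pre n = [] := by
  induction pre generalizing n with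
  | nil => simp [pvIdxsFrom, PySem.List.enumerate_nil]
  | cons l t ih =>
    rw [pvIdxsFrom_cons]
    simp [hpre l (by simp), ih (n + 1) (fun x hx => hpre x (by simp [hx]))]

theorem pvHeadDrop (lines : List String) (m : String) (t : List String)
    (h : lines.dropWhile (fun l => !pvIsHeader l) = m :: t) : pvIsHeader m = true := by
  induction lines with
  | nil => simp at h
  | cons a as ih =>
    rw [List.dropWhile_cons] at h
    by_cases ha : pvIsHeader a
    · simp [ha] at h
      rw [← h.1]; exact ha
    · simp [ha] at h
      exact ih h

theorem pvIdxs_eq (lines : List String) : pvIdxs lines = pvIdxsFrom lines 0 := rfl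

theorem pvKey (pre suf : List String) (hpreP : ∀ l ∈ pre, pvIsHeader l = false)
    (hsufP : ∀ m t, suf = m :: t → pvIsHeader m = true) :
    headeranddelimiter (pre ++ suf) = headeranddelimiter_alt (pre ++ suf) := by
  cases suf with
  | nil =>
    rw [List.append_nil]
    have hB : headeranddelimiter_alt pre = (0, ".") := by
      unfold headeranddelimiter_alt
      split
      · rfl
      · rename_i f rest hfr
        rw [pvIdxs_eq, pvIdxsFrom_nil_of_no_header pre 0 hpreP] at hfr
        cases hfr
    rw [hB, headeranddelimiter, pvPrefix pre 0 hpreP]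
  | cons m t =>
    have hm : pvIsHeader m = true := hsufP m t rfl
    -- the common first delimiter step never raises: the ',' branch requires no '.'
    have hd1ne : (pvHasD m && ((if pvHasC m && !pvHasD m then "," else ".") == ",")) = false := by
      cases hD : pvHasD m <;> simp_all
    have hstepA : ∀ n : Int, pvAStep (some (0, false, ".")) (n, m) =
        some (n, true, if pvHasC m && !pvHasD m then "," else ".") := by
      intro n
      simp [pvAStep, hm]
      tauto
    have hstepD : pvDStep (some ".") m =
        some (if pvHasC m && !pvHasD m then "," else ".") := by
      simp [pvDStep]
      tauto
    -- A's side
    have hA : (PySem.List.enumerate (pre ++ m :: t) 0).foldl pvAStep (some (0, false, ".")) =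
        ((m :: t).foldl pvDStep (some ".")).map
          (fun d' => (pvLastHdr t ((pre.length : Int) + 1) (pre.length : Int), true, d')) := by
      rw [PySem.List.enumerate_append, List.foldl_append, pvPrefix pre 0 hpreP,
        PySem.List.enumerate_cons]
      simp only [List.foldl_cons]
      rw [hstepA, hstepD, pvMain]
      norm_num
    -- B's side: the index list starts with pre.length
    have hidx : pvIdxs (pre ++ m :: t) =
        (pre.length : Int) :: pvIdxsFrom t ((pre.length : Int) + 1) := by
      have h2 : pvIdxs (pre ++ m :: t) =
          pvIdxsFrom pre 0 ++ pvIdxsFrom (m :: t) ((0 : Int) + pre.length) := by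
        simp [pvIdxs, pvIdxsFrom, PySem.List.enumerate_append]
      rw [h2, pvIdxsFrom_nil_of_no_header pre 0 hpreP, pvIdxsFrom_cons]
      simp [hm]
    have hslice : PySem.List.slice (pre ++ m :: t) (some (pre.length : Int)) none = m :: t := by
      rw [PySem.List.slice_from_natCast]
      simp
    -- assemble, by cases on whether the delimiter loop raises
    cases hfold : (m :: t).foldl pvDStep (some ".") with
    | none =>
      have hAv : headeranddelimiter (pre ++ m :: t) = (0, ".") := by
        rw [headeranddelimiter, hA, hfold]
        rfl
      have hBv : headeranddelimiter_alt (pre ++ m :: t) = (0, ".") := by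
        unfold headeranddelimiter_alt
        split
        · rfl
        · rename_i f rest hfr
          rw [hidx] at hfr
          obtain ⟨hf, hrest⟩ := List.cons.inj hfr
          subst hf
          rw [hslice, hfold]
      rw [hAv, hBv]
    | some dd =>
      have hAv : headeranddelimiter (pre ++ m :: t) =
          (pvLastHdr t ((pre.length : Int) + 1) (pre.length : Int), dd) := by
        rw [headeranddelimiter, hA, hfold]
        rfl
      have hBv : headeranddelimiter_alt (pre ++ m :: t) =
          (pvLastHdr t ((pre.length : Int) + 1) (pre.length : Int), dd) := by
        unfold headeranddelimiter_alt
        split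
        · rename_i hnil
          rw [hidx] at hnil
          cases hnil
        · rename_i f rest hfr
          rw [hidx] at hfr
          obtain ⟨hf, hrest⟩ := List.cons.inj hfr
          subst hf
          have hlast : (((pre.length : Int)) :: rest).getLast (by simp) =
              pvLastHdr t ((pre.length : Int) + 1) (pre.length : Int) := by
            rw [pvLastHdr_eq_getLastD, ← hrest, List.getLast_eq_getLastD]
          rw [hslice, hfold]
          simp [hlast]
      rw [hAv, hBv]

theorem headeranddelimiter_spec_aux (lines : List String) :
    headeranddelimiter lines = headeranddelimiter_alt lines := by
  have h1 := pvKey (lines.takeWhile (fun l => !pvIsHeader l))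
      (lines.dropWhile (fun l => !pvIsHeader l))
      (fun l hl => by simpa using List.mem_takeWhile_imp hl)
      (fun m t h => pvHeadDrop lines m t h)
  rwa [List.takeWhile_append_dropWhile] at h1

-- ===== VERDICT (by name: the statement is the Claim_ definition above) =====
theorem headeranddelimiter_spec : Claim_equal_headeranddelimiter := by
  intro lines _ _
  exact headeranddelimiter_spec_aux lines
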